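-- pv_equiv track=rewrite | github.com/codeit-bootcamp-frontend/0-study-algorithms | 프로그래머스/unrated/152995. 인사고과/인사고과.py | solution
-- ===== SOURCE A (Python) =====
-- def solution(scores):
--     wonho = scores[0]
--
--     scores.sort(key=lambda x: (-x[0], x[1]))
--
--     curr = scores[0]
--     possible_list = []
--     for score in scores:
--         curr = [max(curr[0], score[0]), max(curr[1], score[1])]
--         if score[0] < curr[0] and score[1] < curr[1]:
--             if score == wonho:
--                 return -1
--             continue
--         possible_list.append(score)
--
--     temp = sorted(possible_list, key=lambda x : sum(x))
--     sorted_list = temp[::-1]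
--
--     if wonho == sorted_list[0]:
--         return 1
--
--     rank = [1]
--     for i in range(1, len(sorted_list)):
--         if sum(sorted_list[i]) == sum(sorted_list[i-1]):
--             rank.append(rank[-1])
--         else:
--             rank.append(i+1)
--
--         if sorted_list[i] == wonho:
--             return rank[-1]
-- ===== SOURCE B (Python) =====
-- def solution(scores):
--     # Note: like A, this sorts `scores` in place (same key), so the caller-visible
--     # mutation is identical; equivalence claimed is about the return value.
--     wonho = scores[0]
--     scores.sort(key=lambda x: (-x[0], x[1]))
--     wonho_sum = sum(wonho)
--     c0, c1 = scores[0][0], scores[0][1]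
--     better = 0
--     for s in scores:
--         c0 = max(c0, s[0])
--         c1 = max(c1, s[1])
--         if s[0] < c0 and s[1] < c1:
--             if s == wonho:
--                 return -1
--         elif sum(s) > wonho_sum:
--             better += 1
--     return better + 1
-- ===== Notes on version B (the rewrite author's own statement) =====
-- stated objective: simpler
-- what changed: A's second phase (sort possible_list by sum, reverse, build a rank array and walk it to find wonho's competition rank) is replaced by a single counting pass fused into the domination scan: the rank is 1 + the number of non-dominated scores whose sum is strictly larger than wonho's, so the second sort, the reversal, the rank list and the index walk all disappear.
import Mathlib
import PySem

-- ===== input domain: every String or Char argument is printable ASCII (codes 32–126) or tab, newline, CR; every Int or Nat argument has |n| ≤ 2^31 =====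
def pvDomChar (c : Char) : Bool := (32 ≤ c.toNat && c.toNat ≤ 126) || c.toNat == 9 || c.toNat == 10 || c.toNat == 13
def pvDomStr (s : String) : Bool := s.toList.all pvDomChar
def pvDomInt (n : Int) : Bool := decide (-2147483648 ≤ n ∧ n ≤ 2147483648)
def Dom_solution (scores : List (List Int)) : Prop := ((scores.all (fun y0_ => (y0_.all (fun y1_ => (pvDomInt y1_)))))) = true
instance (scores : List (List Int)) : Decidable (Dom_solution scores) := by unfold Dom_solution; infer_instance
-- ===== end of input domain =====

-- B replaces A's second sort + rank-array walk by a single counting pass fused into the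
-- domination scan (same competition rank = 1 + #candidates with a strictly larger sum).
-- Both A and B sort `scores` in place with the same key, so the caller-visible mutation is
-- identical; the equivalence proved here is about the return value.

-- ===== PORT A =====
-- the for-loop over the sorted scores: cumulative max `curr`, early `return -1`, possible_list accumulator
def solutionScan (wonho : List Int) : List (List Int) → List Int → List (List Int) → Option (List (List Int))
  | [], _, possible => some possible
  | score :: rest, curr, possible =>
    let curr' := [max (PySem.List.pyGetD curr 0 0) (PySem.List.pyGetD score 0 0),
                  max (PySem.List.pyGetD curr 1 0) (PySem.List.pyGetD score 1 0)]
    if PySem.List.pyGetD score 0 0 < PySem.List.pyGetD curr' 0 0 ∧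
       PySem.List.pyGetD score 1 0 < PySem.List.pyGetD curr' 1 0 then
      if score == wonho then none
      else solutionScan wonho rest curr' possible
    else solutionScan wonho rest curr' (possible ++ [score])

-- the rank loop `for i in range(1, len(sorted_list))` with the rank list
def solutionRank (sl : List (List Int)) (wonho : List Int) (i : Nat) (rank : List Int) : Int :=
  if _h : i < sl.length then
    let r : Int := if (PySem.List.pyGetD sl (i : Int) []).sum = (PySem.List.pyGetD sl ((i : Int) - 1) []).sum
                   then PySem.List.pyGetD rank (-1) 0
                   else (i : Int) + 1
    if PySem.List.pyGetD sl (i : Int) [] == wonho then r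
    else solutionRank sl wonho (i + 1) (rank ++ [r])
  else 0  -- Python falls off the loop and returns None; unreachable under Pre_solution (wonho is in sl)
termination_by sl.length - i

def solution (scores : List (List Int)) : Int :=
  let wonho := PySem.List.pyGetD scores 0 []
  let ss := PySem.List.sorted2 scores (fun x => -(PySem.List.pyGetD x 0 0)) (fun x => PySem.List.pyGetD x 1 0)
  match solutionScan wonho ss (PySem.List.pyGetD ss 0 []) [] with
  | none => -1
  | some possible =>
    let temp := PySem.List.sorted possible (fun x => x.sum)
    let sl := temp.reverse  -- temp[::-1]  (PySem.List.slice?_none_none_neg_one)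
    if wonho == PySem.List.pyGetD sl 0 [] then 1
    else solutionRank sl wonho 1 [1]

-- ===== PORT B =====
-- single pass: cumulative maxes, early -1, and the count of non-dominated scores with a larger sum
def solutionAltLoop (wonho : List Int) (wsum : Int) : List (List Int) → Int → Int → Int → Option Int
  | [], _, _, better => some better
  | s :: rest, c0, c1, better =>
    let c0' := max c0 (PySem.List.pyGetD s 0 0)
    let c1' := max c1 (PySem.List.pyGetD s 1 0)
    if PySem.List.pyGetD s 0 0 < c0' ∧ PySem.List.pyGetD s 1 0 < c1' then
      if s == wonho then none
      else solutionAltLoop wonho wsum rest c0' c1' better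
    else if s.sum > wsum then solutionAltLoop wonho wsum rest c0' c1' (better + 1)
    else solutionAltLoop wonho wsum rest c0' c1' better

def solution_alt (scores : List (List Int)) : Int :=
  let wonho := PySem.List.pyGetD scores 0 []
  let ss := PySem.List.sorted2 scores (fun x => -(PySem.List.pyGetD x 0 0)) (fun x => PySem.List.pyGetD x 1 0)
  let s0 := PySem.List.pyGetD ss 0 []
  match solutionAltLoop wonho wonho.sum ss (PySem.List.pyGetD s0 0 0) (PySem.List.pyGetD s0 1 0) 0 with
  | none => -1
  | some better => better + 1

-- ===== PRECONDITION & SPEC =====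
-- Pre_ excludes exactly the inputs where the Python A raises: an empty list (scores[0] →
-- IndexError) and rows with fewer than 2 entries (x[0]/x[1] in the sort key → IndexError).
def Pre_solution (scores : List (List Int)) : Prop :=
  scores ≠ [] ∧ ∀ s ∈ scores, 2 ≤ s.length
instance (scores : List (List Int)) : Decidable (Pre_solution scores) := by unfold Pre_solution; infer_instance

def pvWitness_solution : List (List Int) := [[2, 2], [1, 3]]

def Spec_solution (scores : List (List Int)) (out : Int) : Prop := out = solution_alt scores
instance (scores : List (List Int)) (out : Int) : Decidable (Spec_solution scores out) := by unfold Spec_solution; infer_instance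

-- ===== CLAIM (what is proved, stated in full; the proofs are below) =====
def Claim_equal_solution : Prop := ∀ (scores : List (List Int)), Dom_solution scores → Pre_solution scores → Spec_solution scores (solution scores)

-- ===== LEMMAS AND PROOFS =====
lemma scan_acc (wonho : List Int) (rest : List (List Int)) :
    ∀ (curr : List Int) (p : List (List Int)),
    solutionScan wonho rest curr p = (solutionScan wonho rest curr []).map (p ++ ·) := by
  induction rest with
  | nil => intro curr p; simp [solutionScan]
  | cons score tl ih =>
    intro curr p
    simp only [solutionScan]
    split
    · split
      · rfl
      · exact ih _ p
    · rw [ih _ (p ++ [score]), ih _ ([] ++ [score])]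
      cases solutionScan wonho tl _ [] <;> simp
lemma pyGetD_pair0 (a b d : Int) : PySem.List.pyGetD [a, b] 0 d = a := by simp [pysem]
lemma pyGetD_pair1 (a b d : Int) : PySem.List.pyGetD [a, b] 1 d = b := by simp [pysem]

-- the scan reads `curr` only through its first two entries
lemma scan_proj (wonho : List Int) (rest : List (List Int)) (curr : List Int) (p : List (List Int)) :
    solutionScan wonho rest curr p
      = solutionScan wonho rest [PySem.List.pyGetD curr 0 0, PySem.List.pyGetD curr 1 0] p := by
  cases rest with
  | nil => rfl
  | cons s tl => simp only [solutionScan, pyGetD_pair0, pyGetD_pair1]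

lemma altLoop_eq_scan (wonho : List Int) (wsum : Int) (rest : List (List Int)) :
    ∀ (c0 c1 better : Int),
    solutionAltLoop wonho wsum rest c0 c1 better
      = (solutionScan wonho rest [c0, c1] []).map
          (fun P => better + (P.countP (fun x => decide (x.sum > wsum)) : Int)) := by
  induction rest with
  | nil => intro c0 c1 better; simp [solutionScan, solutionAltLoop]
  | cons s tl ih =>
    intro c0 c1 better
    simp only [solutionAltLoop, solutionScan, pyGetD_pair0, pyGetD_pair1]
    split
    · split
      · rfl
      · exact ih _ _ _
    · simp only [List.nil_append]; rw [scan_acc wonho tl _ [s]]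
      by_cases hs : s.sum > wsum
      · rw [if_pos hs, ih]
        cases solutionScan wonho tl _ [] with
        | none => rfl
        | some P => simp [hs]; ring
      · rw [if_neg hs, ih]
        cases solutionScan wonho tl _ [] with
        | none => rfl
        | some P => simp [hs]
lemma scan_mem (wonho : List Int) (rest : List (List Int)) :
    ∀ (curr : List Int) (P : List (List Int)),
    solutionScan wonho rest curr [] = some P → wonho ∈ rest → wonho ∈ P := by
  induction rest with
  | nil => intro curr P h hw; cases hw
  | cons s tl ih =>
    intro curr P h hw
    simp only [solutionScan] at h
    split at h
    · split at h
      · cases h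
      · rename_i hne
        have hsw : s ≠ wonho := by simpa using hne
        have : wonho ∈ tl := by
          rcases List.mem_cons.1 hw with h' | h'
          · exact absurd h'.symm hsw
          · exact h'
        exact ih _ _ h this
    · rw [List.nil_append, scan_acc] at h
      cases hscan : solutionScan wonho tl _ [] with
      | none => rw [hscan] at h; cases h
      | some P' =>
        rw [hscan] at h
        simp only [Option.map_some, Option.some.injEq] at h
        subst h
        rcases List.mem_cons.1 hw with h' | h'
        · simp [h']
        · exact List.mem_append_right _ (ih _ _ hscan h')
lemma countP_threshold (sl : List (List Int)) (i : Nat) (hi : i ≤ sl.length) (t : Int)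
    (h1 : ∀ j (hj : j < i), t < (sl[j]'(lt_of_lt_of_le hj hi)).sum)
    (h2 : ∀ j (hj : j < sl.length), i ≤ j → sl[j].sum ≤ t) :
    sl.countP (fun x => decide (x.sum > t)) = i := by
  rw [← List.take_append_drop i sl, List.countP_append]
  have ht : (sl.take i).countP (fun x => decide (x.sum > t)) = (sl.take i).length := by
    apply List.countP_eq_length.2
    intro x hx
    rcases List.mem_iff_getElem.1 hx with ⟨j, hj, hxe⟩
    have hj' : j < i := by
      have := hj; simp [List.length_take] at this; omega
    rw [List.getElem_take] at hxe
    subst hxe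
    simpa using h1 j hj'
  have hd : (sl.drop i).countP (fun x => decide (x.sum > t)) = 0 := by
    apply List.countP_eq_zero.2
    intro x hx
    rcases List.mem_iff_getElem.1 hx with ⟨j, hj, hxe⟩
    have hj' : i + j < sl.length := by
      have := hj; simp [List.length_drop] at this; omega
    rw [List.getElem_drop] at hxe
    subst hxe
    simpa using h2 (i + j) hj' (by omega)
  rw [ht, hd, List.length_take]
  omega
lemma rank_eq (sl : List (List Int)) (w : List Int)
    (hpair : sl.Pairwise (fun a b => b.sum ≤ a.sum)) :
    ∀ (n i : Nat) (rank : List Int), sl.length - i = n → 1 ≤ i → w ∈ sl.drop i →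
    (∀ (hi1 : i - 1 < sl.length),
      PySem.List.pyGetD rank (-1) 0 = 1 + (sl.countP (fun x => decide (x.sum > (sl[i-1]).sum)) : Int)) →
    solutionRank sl w i rank = 1 + (sl.countP (fun x => decide (x.sum > w.sum)) : Int) := by
  have hget : ∀ p q (hp : p < q) (hq : q < sl.length), (sl[q]).sum ≤ (sl[p]'(lt_trans hp hq)).sum :=
    fun p q hp hq => List.pairwise_iff_getElem.1 hpair p q (lt_trans hp hq) hq hp
  intro n
  induction n with
  | zero =>
    intro i rank hn _ hw _
    rw [List.drop_eq_nil_of_le (by omega)] at hw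
    cases hw
  | succ n ih =>
    intro i rank hn hi hw hlast
    have hilt : i < sl.length := by
      by_contra hcon
      rw [List.drop_eq_nil_of_le (by omega)] at hw
      cases hw
    have hi1lt : i - 1 < sl.length := by omega
    have hgi : PySem.List.pyGetD sl (i : Int) [] = sl[i] := by
      rw [PySem.List.pyGetD_natCast, List.getD_eq_getElem _ _ hilt]
    have hgi1 : PySem.List.pyGetD sl ((i : Int) - 1) [] = sl[i-1] := by
      have h : (i : Int) - 1 = ((i - 1 : Nat) : Int) := by omega
      rw [h, PySem.List.pyGetD_natCast, List.getD_eq_getElem _ _ hi1lt]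
    have hr : (if (PySem.List.pyGetD sl (i : Int) []).sum = (PySem.List.pyGetD sl ((i : Int) - 1) []).sum
               then PySem.List.pyGetD rank (-1) 0 else (i : Int) + 1)
        = 1 + (sl.countP (fun x => decide (x.sum > (sl[i]).sum)) : Int) := by
      rw [hgi, hgi1]
      by_cases hsum : (sl[i]).sum = (sl[i-1]).sum
      · rw [if_pos hsum, hlast hi1lt, hsum]
      · rw [if_neg hsum]
        have hcount : sl.countP (fun x => decide (x.sum > (sl[i]).sum)) = i := by
          apply countP_threshold sl i (le_of_lt hilt)
          · intro j hj
            have h1 : (sl[i]).sum ≤ (sl[i-1]).sum := by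
              rcases Nat.lt_or_ge (i-1) i with h | h
              · exact hget _ _ h hilt
              · omega
            have h2 : (sl[i-1]).sum ≤ (sl[j]'(lt_of_lt_of_le hj (le_of_lt hilt))).sum := by
              rcases Nat.lt_or_ge j (i-1) with h | h
              · exact hget _ _ h hi1lt
              · have hji : j = i - 1 := by omega
                subst hji; rfl
            exact lt_of_lt_of_le (lt_of_le_of_ne h1 hsum) h2
          · intro j hj hij
            rcases Nat.lt_or_ge i j with h | h
            · exact hget _ _ h hj
            · have hji : j = i := by omega
              subst hji; rfl
        rw [hcount]; omega
    rw [solutionRank, dif_pos hilt]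
    rw [hr]
    by_cases hweq : (PySem.List.pyGetD sl (i : Int) [] == w) = true
    · rw [if_pos hweq]
      have hwe : sl[i] = w := by rw [hgi] at hweq; exact eq_of_beq hweq
      rw [← hwe]
    · rw [if_neg hweq]
      have hwne : w ≠ sl[i] := by
        intro hcon; exact hweq (by rw [hgi, hcon]; exact beq_self_eq_true _)
      apply ih (i + 1)
      · omega
      · omega
      · have hd : sl.drop i = sl[i] :: sl.drop (i + 1) := List.drop_eq_getElem_cons hilt
        rw [hd] at hw
        rcases List.mem_cons.1 hw with h | h
        · exact absurd h hwne
        · exact h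
      · intro _
        rw [PySem.List.pyGetD_neg_one_append_singleton]
        simp only [Nat.add_sub_cancel]

-- ===== VERDICT (by name: the statement is the Claim_ definition above) =====
lemma head_sum_max (sl : List (List Int)) (hpair : sl.Pairwise (fun a b => b.sum ≤ a.sum))
    (h0 : 0 < sl.length) : ∀ x ∈ sl, x.sum ≤ (sl[0]).sum := by
  cases sl with
  | nil => cases h0
  | cons a t =>
    intro x hx
    rcases List.mem_cons.1 hx with h | h
    · simp [h]
    · exact (List.pairwise_cons.1 hpair).1 x h

theorem solution_spec : Claim_equal_solution := by
  intro scores _hdom hpre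
  obtain ⟨hne, _⟩ := hpre
  show solution scores = solution_alt scores
  unfold solution solution_alt
  simp only []
  rw [altLoop_eq_scan, ← scan_proj]
  have hwss : PySem.List.pyGetD scores 0 [] ∈
      PySem.List.sorted2 scores (fun x => -(PySem.List.pyGetD x 0 0)) (fun x => PySem.List.pyGetD x 1 0) := by
    apply (PySem.List.sorted2_perm _ _ _ _).mem_iff.2
    cases scores with
    | nil => exact absurd rfl hne
    | cons h t => rw [PySem.List.pyGetD_zero_cons]; exact List.mem_cons_self
  set w := PySem.List.pyGetD scores 0 [] with hw
  set ss := PySem.List.sorted2 scores (fun x => -(PySem.List.pyGetD x 0 0)) (fun x => PySem.List.pyGetD x 1 0) with hss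
  cases hscan : solutionScan w ss (PySem.List.pyGetD ss 0 []) [] with
  | none => rfl
  | some P =>
    simp only [Option.map_some]
    have hwP : w ∈ P := scan_mem w ss _ P hscan hwss
    set sl := (PySem.List.sorted P (fun x => x.sum) false).reverse with hsl
    have hperm : sl.Perm P := (List.reverse_perm _).trans (PySem.List.sorted_perm _ _ _)
    have hpair : sl.Pairwise (fun a b => b.sum ≤ a.sum) := by
      rw [hsl, List.pairwise_reverse]
      exact PySem.List.sorted_pairwise P (fun x => x.sum)
    have hwsl : w ∈ sl := hperm.mem_iff.2 hwP
    have h0 : 0 < sl.length := List.length_pos_of_mem hwsl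
    have hcnt : sl.countP (fun x => decide (x.sum > w.sum)) = P.countP (fun x => decide (x.sum > w.sum)) :=
      hperm.countP_eq _
    have hget0 : PySem.List.pyGetD sl 0 [] = sl[0] := by
      rw [PySem.List.pyGetD_zero, List.getD_eq_getElem _ _ h0]
    have hmax0 : ∀ (hh : sl[0].sum = w.sum), sl.countP (fun x => decide (x.sum > w.sum)) = 0 := by
      intro hh
      apply List.countP_eq_zero.2
      intro x hx
      have := head_sum_max sl hpair h0 x hx
      simp only [decide_eq_true_eq, gt_iff_lt, not_lt]
      omega
    by_cases hweq : (w == PySem.List.pyGetD sl 0 []) = true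
    · rw [if_pos hweq]
      have hwe : w = sl[0] := by rw [hget0] at hweq; exact eq_of_beq hweq
      rw [← hcnt, hmax0 (by rw [hwe])]
      simp
    · rw [if_neg hweq]
      rw [rank_eq sl w hpair (sl.length - 1) 1 [1] rfl le_rfl]
      · rw [hcnt]; ring
      · have hd : sl.drop 0 = sl[0] :: sl.drop 1 := List.drop_eq_getElem_cons h0
        rw [List.drop_zero] at hd
        have hwne : w ≠ sl[0] := by
          intro hcon; exact hweq (by rw [hget0, ← hcon]; exact beq_self_eq_true _)
        rw [hd] at hwsl
        rcases List.mem_cons.1 hwsl with h | h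
        · exact absurd h hwne
        · exact h
      · intro _
        have hl : PySem.List.pyGetD ([1] : List Int) (-1) 0 = 1 := by decide
        rw [hl]
        have : sl.countP (fun x => decide (x.sum > (sl[1-1]).sum)) = 0 := by
          apply List.countP_eq_zero.2
          intro x hx
          have := head_sum_max sl hpair h0 x hx
          simp only [decide_eq_true_eq, gt_iff_lt, not_lt]
          omega
        rw [this]
        simp
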